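-- pv_equiv track=rewrite | github.com/KajaBraz/AdventOfCode2021 | day10.py | count_score_incomplete
-- ===== SOURCE A (Python) =====
-- def count_score_incomplete(missing_part: [str]) -> int:
--     scores = {')': 1,
--               ']': 2,
--               '}': 3,
--               '>': 4}
--     score = 0
--     for char in missing_part:
--         score = score * 5 + scores[char]
--     return score
-- ===== SOURCE B (Python) =====
-- def count_score_incomplete(missing_part: [str]) -> int:
--     scores = {')': 1,
--               ']': 2,
--               '}': 3,
--               '>': 4}
--     return sum(scores[char] * 5 ** i
--                for i, char in enumerate(reversed(missing_part)))
-- ===== Notes on version B (the rewrite author's own statement) =====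
-- stated objective: alternative
-- what changed: Replaced the Horner-style running accumulator (score = score*5 + digit over the list from the front) by an explicit positional base-5 sum: iterate the reversed list and add scores[char]*5**i for each position i.
import Mathlib
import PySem

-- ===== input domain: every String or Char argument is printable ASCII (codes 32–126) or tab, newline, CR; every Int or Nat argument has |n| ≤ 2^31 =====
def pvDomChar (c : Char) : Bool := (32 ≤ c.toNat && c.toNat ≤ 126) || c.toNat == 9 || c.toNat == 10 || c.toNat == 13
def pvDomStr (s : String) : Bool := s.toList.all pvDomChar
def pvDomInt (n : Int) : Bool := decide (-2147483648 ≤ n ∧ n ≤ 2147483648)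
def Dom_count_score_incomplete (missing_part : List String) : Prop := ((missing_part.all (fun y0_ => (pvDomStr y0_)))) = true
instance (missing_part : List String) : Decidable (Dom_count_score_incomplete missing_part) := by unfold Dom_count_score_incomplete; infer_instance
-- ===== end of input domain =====

-- B replaces A's Horner accumulator by a positional base-5 sum over the reversed list (objective: alternative).

-- ===== PORT A =====
def pvScoresA : PySem.Dict String Int :=
  PySem.Dict.ofList [(")", 1), ("]", 2), ("}", 3), (">", 4)]

-- scores[char] raises KeyError for strings not in the dict; Pre_ excludes those, getD 0 is never reached inside Pre_.
def count_score_incomplete (missing_part : List String) : Int :=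
  missing_part.foldl (fun score char => score * 5 + pvScoresA.getD char 0) 0

-- ===== PORT B =====
def pvScoresB : PySem.Dict String Int :=
  PySem.Dict.ofList [(")", 1), ("]", 2), ("}", 3), (">", 4)]

-- positional sum over the reversed list: sum of scores[char] * 5^i
def pvPosSum : List String → Nat → Int
  | [], _ => 0
  | c :: rest, i => pvScoresB.getD c 0 * 5 ^ i + pvPosSum rest (i + 1)

def count_score_incomplete_alt (missing_part : List String) : Int :=
  pvPosSum missing_part.reverse 0

-- ===== PRECONDITION & SPEC =====
-- Pre_: every element is one of the four closer strings; on any other element Python A raises KeyError.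
def Pre_count_score_incomplete (missing_part : List String) : Prop :=
  ∀ s ∈ missing_part, s = ")" ∨ s = "]" ∨ s = "}" ∨ s = ">"
instance (missing_part : List String) : Decidable (Pre_count_score_incomplete missing_part) := by
  unfold Pre_count_score_incomplete; infer_instance

def pvWitness_count_score_incomplete : List String := [")", "]", "}", ">", ")"]

def Spec_count_score_incomplete (missing_part : List String) (out : Int) : Prop := out = count_score_incomplete_alt missing_part
instance (missing_part : List String) (out : Int) : Decidable (Spec_count_score_incomplete missing_part out) := by unfold Spec_count_score_incomplete; infer_instance

-- ===== CLAIM (what is proved, stated in full; the proofs are below) =====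
def Claim_equal_count_score_incomplete : Prop := ∀ (missing_part : List String), Dom_count_score_incomplete missing_part → Pre_count_score_incomplete missing_part → Spec_count_score_incomplete missing_part (count_score_incomplete missing_part)

-- ===== LEMMAS AND PROOFS =====
theorem pvPosSum_succ (ys : List String) (i : Nat) :
    pvPosSum ys (i + 1) = 5 * pvPosSum ys i := by
  induction ys generalizing i with
  | nil => simp [pvPosSum]
  | cons c rest ih =>
    simp only [pvPosSum, ih]
    ring

theorem horner_eq_pos (xs : List String) (a : Int) :
    xs.foldl (fun score char => score * 5 + pvScoresA.getD char 0) a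
      = a * 5 ^ xs.length + pvPosSum xs.reverse 0 := by
  induction xs using List.reverseRecOn generalizing a with
  | nil => simp [pvPosSum]
  | append_singleton ys c ih =>
    rw [List.foldl_append]
    simp only [List.foldl_cons, List.foldl_nil, List.reverse_append,
      List.reverse_cons, List.reverse_nil, List.nil_append, List.cons_append,
      List.length_append, List.length_cons, List.length_nil]
    rw [ih, pvPosSum]
    rw [pvPosSum_succ]
    rw [show pvScoresB = pvScoresA from rfl]
    ring

-- ===== VERDICT (by name: the statement is the Claim_ definition above) =====
theorem count_score_incomplete_spec : Claim_equal_count_score_incomplete := by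
  intro xs _ _
  show count_score_incomplete xs = count_score_incomplete_alt xs
  unfold count_score_incomplete count_score_incomplete_alt
  rw [horner_eq_pos]
  simp
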